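-- pv_equiv track=rewrite | github.com/Tugcga/S-USD | utils.py | usd_to_xsi_faces_array
-- ===== SOURCE A (Python) =====
-- def usd_to_xsi_faces_array(face_indexes, face_sizes, up_axis):
--     # if up_axis = Z, then we should invert polygons
--     polygons = []
--     index = 0
--     for f in face_sizes:
--         polygons.append(f)
--         start_polygon_index = index  # index of the first point in the polygon
--         for i in range(f):
--             if up_axis == "Y":
--                 polygons.append(face_indexes[index])
--             else:  # invert the polygon
--                 if i == 0:  # the first point is the same
--                     polygons.append(face_indexes[index])
--                 else:  # all other point shoyld be done from the end
--                     polygons.append(face_indexes[start_polygon_index + f - i])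
--             index += 1
--     return polygons
-- ===== SOURCE B (Python) =====
-- def usd_to_xsi_faces_array(face_indexes, face_sizes, up_axis):
--     # Per-face chunk decomposition: take the face's indices in one go,
--     # then emit them as-is (Y up) or head + reversed tail (invert).
--     polygons = []
--     index = 0
--     for f in face_sizes:
--         chunk = [face_indexes[index + j] for j in range(f)]
--         index += len(chunk)
--         polygons.append(f)
--         if up_axis == "Y":
--             polygons.extend(chunk)
--         else:
--             polygons.extend(chunk[:1])
--             polygons.extend(reversed(chunk[1:]))
--     return polygons
-- ===== Notes on version B (the rewrite author's own statement) =====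
-- stated objective: simpler
-- what changed: Replaces A's per-element inner loop with its start_polygon_index+f-i back-indexing arithmetic by a per-face decomposition: build the face's index chunk once, then extend the result with the chunk as-is (Y up) or with its head plus reversed tail (inverted).
import Mathlib
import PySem

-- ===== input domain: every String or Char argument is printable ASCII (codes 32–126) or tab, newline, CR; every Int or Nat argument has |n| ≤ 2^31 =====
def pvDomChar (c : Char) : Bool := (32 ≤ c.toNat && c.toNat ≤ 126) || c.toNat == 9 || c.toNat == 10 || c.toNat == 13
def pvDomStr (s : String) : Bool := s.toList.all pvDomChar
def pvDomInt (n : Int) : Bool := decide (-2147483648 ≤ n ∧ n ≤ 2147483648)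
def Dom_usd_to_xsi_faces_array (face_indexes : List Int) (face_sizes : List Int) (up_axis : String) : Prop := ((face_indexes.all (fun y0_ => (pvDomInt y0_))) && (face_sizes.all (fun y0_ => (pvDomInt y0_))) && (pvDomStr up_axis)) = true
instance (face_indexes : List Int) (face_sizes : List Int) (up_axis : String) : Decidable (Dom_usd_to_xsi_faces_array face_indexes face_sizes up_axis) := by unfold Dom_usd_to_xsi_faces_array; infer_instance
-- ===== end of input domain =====

-- B replaces A's per-element inner loop with a per-face chunk (extend, or head + reversed tail); same cost, simpler decomposition.

-- ===== PORT A =====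
-- face_indexes[i] (always accessed at a nonnegative, in-range index under Pre_; out of range = IndexError, excluded by Pre_)
def pvGet (fi : List Int) (i : Int) : Int := (PySem.List.pyGet? fi i).getD 0

-- A's inner loop body: one iteration of `for i in range(f)`
def pvStepA (fi : List Int) (ua : String) (f start : Int) (st2 : List Int × Int) (i : Int) : List Int × Int :=
  (st2.1 ++ [if ua == "Y" then pvGet fi st2.2
             else if i == 0 then pvGet fi st2.2
             else pvGet fi (start + f - i)],
   st2.2 + 1)

-- A's outer loop body: one face
def pvFaceA (fi : List Int) (ua : String) (st : List Int × Int) (f : Int) : List Int × Int :=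
  (PySem.List.pyRange 0 f 1).foldl (pvStepA fi ua f st.2) (st.1 ++ [f], st.2)

def usd_to_xsi_faces_array (face_indexes : List Int) (face_sizes : List Int) (up_axis : String) : List Int :=
  (face_sizes.foldl (pvFaceA face_indexes up_axis) ([], 0)).1

-- ===== PORT B =====
-- B's loop body: build the face's chunk, then append it as-is or head + reversed tail
def pvFaceB (fi : List Int) (ua : String) (st : List Int × Int) (f : Int) : List Int × Int :=
  let chunk := (PySem.List.pyRange 0 f 1).map (fun j => pvGet fi (st.2 + j))
  (st.1 ++ [f] ++ (if ua == "Y" then chunk else chunk.take 1 ++ (chunk.drop 1).reverse),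
   st.2 + (chunk.length : Int))

def usd_to_xsi_faces_array_alt (face_indexes : List Int) (face_sizes : List Int) (up_axis : String) : List Int :=
  (face_sizes.foldl (pvFaceB face_indexes up_axis) ([], 0)).1

-- ===== PRECONDITION & SPEC =====
-- Pre_ excludes exactly the inputs where the Python A raises IndexError: the faces
-- need more indices than face_indexes provides (B raises there too).
def Pre_usd_to_xsi_faces_array (face_indexes : List Int) (face_sizes : List Int) (up_axis : String) : Prop :=
  ((face_sizes.map (fun f => max f 0)).sum ≤ (face_indexes.length : Int))
instance (face_indexes : List Int) (face_sizes : List Int) (up_axis : String) : Decidable (Pre_usd_to_xsi_faces_array face_indexes face_sizes up_axis) := by unfold Pre_usd_to_xsi_faces_array; infer_instance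

def pvWitness_usd_to_xsi_faces_array : List Int × List Int × String := ([10, 11, 12, 13], [3, 1], "Z")

def Spec_usd_to_xsi_faces_array (face_indexes : List Int) (face_sizes : List Int) (up_axis : String) (out : List Int) : Prop := out = usd_to_xsi_faces_array_alt face_indexes face_sizes up_axis
instance (face_indexes : List Int) (face_sizes : List Int) (up_axis : String) (out : List Int) : Decidable (Spec_usd_to_xsi_faces_array face_indexes face_sizes up_axis out) := by unfold Spec_usd_to_xsi_faces_array; infer_instance

-- ===== CLAIM (what is proved, stated in full; the proofs are below) =====
def Claim_equal_usd_to_xsi_faces_array : Prop := ∀ (face_indexes : List Int) (face_sizes : List Int) (up_axis : String), Dom_usd_to_xsi_faces_array face_indexes face_sizes up_axis → Pre_usd_to_xsi_faces_array face_indexes face_sizes up_axis → Spec_usd_to_xsi_faces_array face_indexes face_sizes up_axis (usd_to_xsi_faces_array face_indexes face_sizes up_axis)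

-- ===== LEMMAS AND PROOFS =====

theorem pvRange01 (f : Int) : PySem.List.pyRange 0 f 1 = (List.range f.toNat).map (fun (k : Nat) => (k : Int)) := by
  by_cases h : 0 ≤ f
  · conv_lhs => rw [← Int.toNat_of_nonneg h]
    rw [PySem.List.pyRange_zero_natCast]
  · rw [Int.toNat_of_nonpos (by omega)]
    simp [PySem.List.pyRange]
    omega

-- characterisation of A's inner loop
theorem pvInnerA (fi : List Int) (ua : String) (f start : Int) (n : Nat) (acc : List Int) :
    ((List.range n).map (fun (k : Nat) => (k : Int))).foldl (pvStepA fi ua f start) (acc, start) =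
      (acc ++ (List.range n).map (fun i : Nat =>
          if ua == "Y" then pvGet fi (start + i)
          else if i = 0 then pvGet fi start
          else pvGet fi (start + f - i)),
       start + n) := by
  induction n with
  | zero => simp
  | succ n ih =>
    rw [List.range_succ, List.map_append, List.foldl_append, ih]
    simp only [List.map_cons, List.map_nil, List.foldl_cons, List.foldl_nil, pvStepA,
      List.map_append, List.append_assoc, Prod.mk.injEq]
    constructor
    · by_cases hY : ua == "Y"
      · simp [hY]
      · by_cases hn : n = 0
        · subst hn; simp [hY]
        · have h0 : ((n : Int) == 0) = false := by
            simp only [beq_eq_false_iff_ne, ne_eq]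
            exact_mod_cast hn
          simp [hY, h0, hn]
    · push_cast; ring

-- head + reversed tail of a range-map, as the single range-map A builds
theorem pvZList (u : Nat → Int) (n : Nat) :
    (List.range n).map (fun i => if i = 0 then u 0 else u (n - i)) =
      ((List.range n).map u).take 1 ++ (((List.range n).map u).drop 1).reverse := by
  apply List.ext_getElem
  · simp; omega
  · intro i hi hlen
    simp only [List.length_map, List.length_range] at hi
    by_cases h0 : i = 0
    · subst h0
      have hn : 0 < n := hi
      simp [hn]
    · have h1 : ¬ i < (((List.range n).map u).take 1).length := by
        simp; omega
      rw [List.getElem_append, dif_neg h1]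
      have : (if i = 0 then u 0 else u (n - i)) = u (n - i) := by simp [h0]
      simp only [List.getElem_map, List.getElem_range, this]
      simp only [List.getElem_reverse, List.getElem_drop, List.length_drop, List.length_take,
        List.length_map, List.length_range, List.getElem_map, List.getElem_range]
      congr 1
      omega

theorem pvFace_eq (fi : List Int) (ua : String) (st : List Int × Int) (f : Int) :
    pvFaceA fi ua st f = pvFaceB fi ua st f := by
  unfold pvFaceA pvFaceB
  rw [pvRange01, pvInnerA]
  by_cases hY : ua == "Y"
  · simp [hY, Function.comp, List.append_assoc]
  · by_cases hf : 0 ≤ f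
    · have hm : (List.range f.toNat).map (fun i : Nat =>
          if ua == "Y" then pvGet fi (st.2 + (i:Int))
          else if i = 0 then pvGet fi st.2
          else pvGet fi (st.2 + f - (i:Int)))
        = (List.range f.toNat).map (fun i : Nat =>
            if i = 0 then pvGet fi (st.2 + ((0:Nat):Int))
            else pvGet fi (st.2 + ((f.toNat - i : Nat):Int))) := by
        apply List.map_congr_left
        intro i hmem
        have hi : i < f.toNat := List.mem_range.mp hmem
        by_cases h0 : i = 0
        · simp [h0, hY]
        · have harith : st.2 + f - (i:Int) = st.2 + ((f.toNat - i : Nat):Int) := by omega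
          simp [h0, hY, harith]
      rw [hm, pvZList (fun j : Nat => pvGet fi (st.2 + (j:Int))) f.toNat]
      simp only [hY, List.append_assoc, List.map_map, List.length_map, List.length_range,
        Bool.false_eq_true, if_false, List.drop_one, Prod.mk.injEq]
      constructor <;> trivial
    · have h0 : f.toNat = 0 := by omega
      simp [h0, hY]

-- ===== VERDICT (by name: the statement is the Claim_ definition above) =====
theorem usd_to_xsi_faces_array_spec : Claim_equal_usd_to_xsi_faces_array := by
  intro fi fs ua _ _
  unfold Spec_usd_to_xsi_faces_array usd_to_xsi_faces_array usd_to_xsi_faces_array_alt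
  rw [funext (fun st => funext (fun f => pvFace_eq fi ua st f))]
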